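-- pv_equiv track=rewrite | github.com/just-ign/web-ai-temp | Web_AI.py | _pid_appears_as_token
-- ===== SOURCE A (Python) =====
-- def _pid_appears_as_token(pid, blob):
--     """True if pid is present as a non-substring-of-longer-digit token in blob."""
--     if blob is None:
--         return False
--     s = str(pid)
--     if not s:
--         return False
--     i = 0
--     n = len(blob)
--     ls = len(s)
--     while True:
--         j = blob.find(s, i)
--         if j < 0:
--             return False
--         left_ok = j == 0 or not blob[j - 1].isdigit()
--         right_ok = j + ls >= n or not blob[j + ls].isdigit()
--         if left_ok and right_ok:
--             return True
--         i = j + 1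
-- ===== SOURCE B (Python) =====
-- def _pid_appears_as_token(pid, blob):
--     """True if pid is present as a non-substring-of-longer-digit token in blob."""
--     if blob is None:
--         return False
--     s = str(pid)
--     n, ls = len(blob), len(s)
--     return any(
--         blob[j:j + ls] == s
--         and (j == 0 or not blob[j - 1].isdigit())
--         and (j + ls >= n or not blob[j + ls].isdigit())
--         for j in range(n + 1)
--     )
-- ===== Notes on version B (the rewrite author's own statement) =====
-- stated objective: simpler
-- what changed: A's while-loop that repeatedly calls blob.find(s, i) and re-advances past failed matches is replaced by a single any() over every start position testing blob[j:j+ls] == s plus the same digit-boundary guards.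
import Mathlib
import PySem

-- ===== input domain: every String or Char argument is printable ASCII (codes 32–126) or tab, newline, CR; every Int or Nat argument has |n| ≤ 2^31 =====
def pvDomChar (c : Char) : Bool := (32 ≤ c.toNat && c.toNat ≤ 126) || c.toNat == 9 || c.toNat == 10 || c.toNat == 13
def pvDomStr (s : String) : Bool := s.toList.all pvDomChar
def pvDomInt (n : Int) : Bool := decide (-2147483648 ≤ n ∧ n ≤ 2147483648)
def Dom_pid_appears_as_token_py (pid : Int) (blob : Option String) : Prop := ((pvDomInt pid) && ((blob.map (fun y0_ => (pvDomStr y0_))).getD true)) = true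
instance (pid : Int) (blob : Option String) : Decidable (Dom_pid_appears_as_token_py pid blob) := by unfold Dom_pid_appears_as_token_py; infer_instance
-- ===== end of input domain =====

-- B replaces A's find-and-advance scanning loop by a single any() over every start position; objective: simpler.

-- ===== PORT A =====
-- A's while-loop: repeatedly blob.find(s, i); fuel = blob.length + 1 - i steps always suffice
-- (each iteration strictly increases i, and a start past the end makes find return -1).
def pvLoopA (blob s : List Char) : Nat → Nat → Bool
  | 0, _ => false
  | fuel+1, i =>
    let j := PySem.Chars.findFrom blob s (i : Int)
    if j < 0 then false
    else
      let jn := j.toNat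
      -- blob[j-1] / blob[j+ls]: indices are in range exactly when the guard before 'or' fails
      let left_ok := jn == 0 || !(PySem.Chars.isdigit (blob.getD (jn - 1) ' '))
      let right_ok := decide (blob.length ≤ jn + s.length) || !(PySem.Chars.isdigit (blob.getD (jn + s.length) ' '))
      if left_ok && right_ok then true else pvLoopA blob s fuel (jn + 1)

def pid_appears_as_token_py (pid : Int) (blob : Option String) : Bool :=
  match blob with
  | none => false
  | some b =>
    let bl := b.toList
    let s := PySem.Int.toChars pid
    if s = [] then false
    else pvLoopA bl s (bl.length + 1) 0

-- ===== PORT B =====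
def pid_appears_as_token_py_alt (pid : Int) (blob : Option String) : Bool :=
  match blob with
  | none => false
  | some b =>
    let bl := b.toList
    let s := PySem.Int.toChars pid
    (List.range (bl.length + 1)).any (fun j =>
      decide (PySem.List.slice bl (some (j : Int)) (some ((j : Int) + (s.length : Int))) = s)
      && (j == 0 || !(PySem.Chars.isdigit (bl.getD (j - 1) ' ')))
      && (decide (bl.length ≤ j + s.length) || !(PySem.Chars.isdigit (bl.getD (j + s.length) ' '))))

-- ===== PRECONDITION & SPEC =====
def Spec_pid_appears_as_token_py (pid : Int) (blob : Option String) (out : Bool) : Prop := out = pid_appears_as_token_py_alt pid blob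
instance (pid : Int) (blob : Option String) (out : Bool) : Decidable (Spec_pid_appears_as_token_py pid blob out) := by unfold Spec_pid_appears_as_token_py; infer_instance

-- ===== CLAIM (what is proved, stated in full; the proofs are below) =====
def Claim_equal_pid_appears_as_token_py : Prop := ∀ (pid : Int) (blob : Option String), Dom_pid_appears_as_token_py pid blob → Spec_pid_appears_as_token_py pid blob (pid_appears_as_token_py pid blob)

-- ===== LEMMAS AND PROOFS =====

-- the shared boundary test, as both ports compute it
def pvOk (bl s : List Char) (j : Nat) : Bool :=
  (j == 0 || !(PySem.Chars.isdigit (bl.getD (j - 1) ' ')))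
  && (decide (bl.length ≤ j + s.length) || !(PySem.Chars.isdigit (bl.getD (j + s.length) ' ')))

lemma pv_toChars_ne_nil (pid : Int) : PySem.Int.toChars pid ≠ [] := by
  unfold PySem.Int.toChars
  split
  · simp
  · exact List.ne_nil_of_length_pos Nat.length_toDigits_pos

-- any occurrence of a nonempty s starts strictly inside bl
lemma pv_occ_lt (bl s : List Char) (hs : s ≠ []) (j : Nat) (h : s <+: bl.drop j) :
    j < bl.length := by
  by_contra hj
  have : bl.drop j = [] := List.drop_eq_nil_iff.mpr (by omega)
  rw [this] at h
  exact hs (List.prefix_nil.mp h)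

lemma pv_loop_iff (bl s : List Char) (hs : s ≠ []) :
    ∀ fuel i, i ≤ bl.length → bl.length + 1 ≤ i + fuel →
    (pvLoopA bl s fuel i = true ↔ ∃ j, i ≤ j ∧ s <+: bl.drop j ∧ pvOk bl s j = true) := by
  intro fuel
  induction fuel with
  | zero => intro i hi hf; omega
  | succ fuel ih =>
    intro i hi hf
    simp only [pvLoopA]
    by_cases hneg : PySem.Chars.findFrom bl s (i : Int) = -1
    · rw [hneg, if_pos (show (-1 : Int) < 0 by norm_num)]
      constructor
      · intro h; exact absurd h (by simp)
      · rintro ⟨j, hij, hpre, _⟩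
        exfalso
        have hno := (PySem.Chars.findFrom_natCast_eq_neg_one_iff bl s i hi).mp hneg
        apply hno
        have h1 : s <+: (bl.drop i).drop (j - i) := by
          rw [List.drop_drop]
          have hji : i + (j - i) = j := by omega
          rw [hji]
          exact hpre
        exact (PySem.Chars.isIn_iff_infix s (bl.drop i)).mp
          ((PySem.Chars.exists_prefix_drop_iff_isIn s (bl.drop i)).mp ⟨_, h1⟩)
    · obtain ⟨hle, hpre, hmin⟩ := PySem.Chars.findFrom_natCast_spec bl s i hi hneg
      have hJ0 : ¬ (PySem.Chars.findFrom bl s (i : Int) < 0) := by omega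
      rw [if_neg hJ0]
      have hiJ : i ≤ (PySem.Chars.findFrom bl s (i : Int)).toNat := by omega
      have hcond : ((((PySem.Chars.findFrom bl s (i : Int)).toNat == 0
              || !(PySem.Chars.isdigit (bl.getD ((PySem.Chars.findFrom bl s (i : Int)).toNat - 1) ' ')))
            && (decide (bl.length ≤ (PySem.Chars.findFrom bl s (i : Int)).toNat + s.length)
              || !(PySem.Chars.isdigit (bl.getD ((PySem.Chars.findFrom bl s (i : Int)).toNat + s.length) ' '))))
            = pvOk bl s (PySem.Chars.findFrom bl s (i : Int)).toNat) := rfl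
      rw [hcond]
      cases hok : pvOk bl s (PySem.Chars.findFrom bl s (i : Int)).toNat with
      | true =>
        simp only [if_pos]
        constructor
        · intro _; exact ⟨_, hiJ, hpre, hok⟩
        · intro _; trivial
      | false =>
        simp only [Bool.false_eq_true, if_false]
        have hJlt : (PySem.Chars.findFrom bl s (i : Int)).toNat < bl.length :=
          pv_occ_lt bl s hs _ hpre
        rw [ih ((PySem.Chars.findFrom bl s (i : Int)).toNat + 1) (by omega) (by omega)]
        constructor
        · rintro ⟨j, hj1, hj2, hj3⟩; exact ⟨j, by omega, hj2, hj3⟩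
        · rintro ⟨j, hj1, hj2, hj3⟩
          refine ⟨j, ?_, hj2, hj3⟩
          rcases Nat.lt_or_ge j ((PySem.Chars.findFrom bl s (i : Int)).toNat + 1) with h | h
          · exfalso
            rcases Nat.lt_or_ge j (PySem.Chars.findFrom bl s (i : Int)).toNat with h' | h'
            · exact hmin j hj1 h' hj2
            · have hji : j = (PySem.Chars.findFrom bl s (i : Int)).toNat := by omega
              rw [hji, hok] at hj3
              exact absurd hj3 (by simp)
          · exact h

lemma pv_alt_iff (pid : Int) (b : String) :
    (pid_appears_as_token_py_alt pid (some b) = true) ↔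
    ∃ j, PySem.Int.toChars pid <+: b.toList.drop j ∧ pvOk b.toList (PySem.Int.toChars pid) j = true := by
  unfold pid_appears_as_token_py_alt
  simp only [List.any_eq_true, List.mem_range, Bool.and_eq_true, decide_eq_true_eq]
  constructor
  · rintro ⟨j, hj, ⟨hsl, hl⟩, hr⟩
    rw [PySem.List.slice_natCast_add] at hsl
    refine ⟨j, ?_, ?_⟩
    · rw [List.prefix_iff_eq_take]; exact hsl.symm
    · unfold pvOk; rw [Bool.and_eq_true]; exact ⟨hl, hr⟩
  · rintro ⟨j, hpre, hok⟩
    have hlen := pv_occ_lt b.toList (PySem.Int.toChars pid) (pv_toChars_ne_nil pid) j hpre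
    unfold pvOk at hok
    rw [Bool.and_eq_true] at hok
    refine ⟨j, by omega, ⟨?_, hok.1⟩, hok.2⟩
    rw [PySem.List.slice_natCast_add]
    exact (List.prefix_iff_eq_take.mp hpre).symm

-- ===== VERDICT (by name: the statement is the Claim_ definition above) =====
theorem pid_appears_as_token_py_spec : Claim_equal_pid_appears_as_token_py := by
  intro pid blob _
  unfold Spec_pid_appears_as_token_py
  match blob with
  | none => rfl
  | some b =>
    rw [Bool.eq_iff_iff]
    have hs := pv_toChars_ne_nil pid
    unfold pid_appears_as_token_py
    simp only [if_neg hs]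
    rw [pv_loop_iff b.toList (PySem.Int.toChars pid) hs (b.toList.length + 1) 0 (by omega) (by omega)]
    rw [pv_alt_iff pid b]
    constructor
    · rintro ⟨j, _, h2, h3⟩; exact ⟨j, h2, h3⟩
    · rintro ⟨j, h2, h3⟩; exact ⟨j, Nat.zero_le j, h2, h3⟩
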